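-- pv_equiv track=rewrite | github.com/menezesd/SylowSolver | sylow2.py | p_killable
-- ===== SOURCE A (Python) =====
-- import math
-- from typing import List, Tuple
--
-- def divisors(n: int) -> List[int]:
--     """Return the divisors of n (unsorted order may vary)."""
--     if n <= 0:
--         return []
--     divs = []
--     r = int(math.isqrt(n))
--     for i in range(1, r + 1):
--         if n % i == 0:
--             divs.append(i)
--             j = n // i
--             if j != i:
--                 divs.append(j)
--     divs.sort()
--     return divs
--
-- def p_killable(p: int, n: int) -> bool:
--     """Return True if there is no divisor d>1 of n with d ≡ 1 (mod p).
--
--     Matches the original semantics: check all divisors except 1.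
--     """
--     divs = divisors(n)
--     try:
--         divs.remove(1)
--     except ValueError:
--         pass
--     for d in divs:
--         if d % p == 1:
--             return False
--     return True
-- ===== SOURCE B (Python) =====
-- import math
--
-- def p_killable(p: int, n: int) -> bool:
--     """Return True if there is no divisor d>1 of n with d ≡ 1 (mod p).
--
--     Walks two arithmetic progressions of step p instead of enumerating
--     divisors: a small divisor d ≡ 1 (mod p) lies on 1+p, 1+2p, ... <= isqrt(n);
--     a large one has cofactor c = n // d <= isqrt(n) with c ≡ n (mod p), since
--     n = c*d ≡ c (mod p).  For p <= 1 no value satisfies d % p == 1 in Python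
--     (the remainder takes the divisor's sign), and n <= 0 has no divisors.
--     """
--     if p <= 1 or n <= 0:
--         return True
--     r = math.isqrt(n)
--     d = 1 + p
--     while d <= r:
--         if n % d == 0:
--             return False
--         d += p
--     c = n % p or p
--     while c <= r:
--         if n % c == 0:
--             d = n // c
--             if d > 1 and d % p == 1:
--                 return False
--         c += p
--     return True
-- ===== Notes on version B (the rewrite author's own statement) =====
-- stated objective: alternative
-- what changed: B walks two step-p arithmetic progressions up to isqrt(n) (candidates d = 1+kp, and cofactors c with c ≡ n mod p whose complement n//c is tested), instead of enumerating all divisors by trial division over every i ≤ isqrt(n), sorting them, removing 1 and scanning for d % p == 1; for p <= 1 it returns True at once since d % p == 1 is unsatisfiable in Python.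
import Mathlib
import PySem

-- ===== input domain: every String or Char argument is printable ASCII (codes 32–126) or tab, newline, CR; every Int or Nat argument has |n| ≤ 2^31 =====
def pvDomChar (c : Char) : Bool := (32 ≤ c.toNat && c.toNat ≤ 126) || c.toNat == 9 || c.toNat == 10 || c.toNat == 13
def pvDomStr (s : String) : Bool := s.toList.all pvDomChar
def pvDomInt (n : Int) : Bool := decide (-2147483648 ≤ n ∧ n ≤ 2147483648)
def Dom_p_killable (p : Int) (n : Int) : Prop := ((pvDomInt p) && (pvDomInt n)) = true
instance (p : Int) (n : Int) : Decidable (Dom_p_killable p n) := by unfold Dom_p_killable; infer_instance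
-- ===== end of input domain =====

-- B walks two step-p arithmetic progressions up to isqrt(n) (candidates d ≡ 1 mod p, and cofactors
-- c ≡ n mod p of the large candidates), True at once for p ≤ 1, instead of enumerating, sorting and
-- scanning all divisors of n: objective 'alternative'.

-- ===== PORT A =====
-- helper 'divisors' of A, transliterated: build pairs up to isqrt(n), sort ascending
def divisorsA (n : Int) : List Int :=
  if n ≤ 0 then []
  else
    let r : Int := (Nat.sqrt n.toNat : Int)   -- int(math.isqrt(n)), n > 0 here
    let divs := (PySem.List.pyRange 1 (r + 1) 1).foldl
      (fun divs i =>
        if PySem.Int.mod n i = 0 then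
          let divs := divs ++ [i]
          let j := PySem.Int.floordiv n i
          if j ≠ i then divs ++ [j] else divs
        else divs) []
    PySem.List.sorted divs (fun x => x) false

def p_killable (p : Int) (n : Int) : Bool :=
  let divs := divisorsA n
  -- try: divs.remove(1) except ValueError: pass
  let divs := (PySem.List.remove? divs 1).getD divs
  -- for d in divs: if d % p == 1: return False / return True  (early-exit scan)
  !(divs.any (fun d => PySem.Int.mod d p == 1))

-- ===== PORT B =====
-- the two 'while … d += p' progression walks; '0 < p' in each guard is a totality
-- guard only: Python reaches the loops only after the 'p <= 1' early return
def pkLoop1 (p : Int) (n : Int) (r : Int) (d : Int) : Bool :=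
  if h : d ≤ r ∧ 0 < p then
    if PySem.Int.mod n d = 0 then false
    else pkLoop1 p n r (d + p)
  else true
termination_by (r + 1 - d).toNat
decreasing_by omega

def pkLoop2 (p : Int) (n : Int) (r : Int) (c : Int) : Bool :=
  if h : c ≤ r ∧ 0 < p then
    if PySem.Int.mod n c = 0 then
      if (PySem.Int.floordiv n c > 1) && (PySem.Int.mod (PySem.Int.floordiv n c) p == 1) then false
      else pkLoop2 p n r (c + p)
    else pkLoop2 p n r (c + p)
  else true
termination_by (r + 1 - c).toNat
decreasing_by all_goals omega

def p_killable_alt (p : Int) (n : Int) : Bool :=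
  if p ≤ 1 ∨ n ≤ 0 then true
  else
    let r : Int := (Nat.sqrt n.toNat : Int)   -- math.isqrt(n), n > 0 here
    if pkLoop1 p n r (1 + p) then
      -- c = n % p or p
      pkLoop2 p n r (if PySem.Int.mod n p = 0 then p else PySem.Int.mod n p)
    else false

-- ===== PRECONDITION & SPEC =====
-- Pre_ excludes p = 0 with n ≥ 2: there A raises ZeroDivisionError on 'd % p'.
def Pre_p_killable (p : Int) (n : Int) : Prop := ¬(p = 0 ∧ 2 ≤ n)
instance (p : Int) (n : Int) : Decidable (Pre_p_killable p n) := by unfold Pre_p_killable; infer_instance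
def pvWitness_p_killable : Int × Int := (3, 10)

def Spec_p_killable (p : Int) (n : Int) (out : Bool) : Prop := out = p_killable_alt p n
instance (p : Int) (n : Int) (out : Bool) : Decidable (Spec_p_killable p n out) := by unfold Spec_p_killable; infer_instance

-- ===== CLAIM (what is proved, stated in full; the proofs are below) =====
def Claim_equal_p_killable : Prop := ∀ (p : Int) (n : Int), Dom_p_killable p n → Pre_p_killable p n → Spec_p_killable p n (p_killable p n)

-- ===== LEMMAS AND PROOFS =====

-- the per-index contribution of A's divisor-building loop
def divChunk (n : Int) (i : Int) : List Int :=
  if PySem.Int.mod n i = 0 then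
    i :: (if PySem.Int.floordiv n i ≠ i then [PySem.Int.floordiv n i] else [])
  else []

theorem divisorsA_eq_flatMap (n : Int) (hn : ¬ n ≤ 0) :
    divisorsA n = PySem.List.sorted
      ((PySem.List.pyRange 1 ((Nat.sqrt n.toNat : Int) + 1) 1).flatMap (divChunk n))
      (fun x => x) false := by
  have hbody : (fun (divs : List Int) (i : Int) =>
      if PySem.Int.mod n i = 0 then
        let divs := divs ++ [i]
        let j := PySem.Int.floordiv n i
        if j ≠ i then divs ++ [j] else divs
      else divs) = fun divs i => divs ++ divChunk n i := by
    funext divs i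
    simp only [divChunk]
    split_ifs with h1 h2 <;> simp
  unfold divisorsA
  rw [if_neg hn]
  show PySem.List.sorted ((PySem.List.pyRange 1 ((Nat.sqrt n.toNat : Int) + 1) 1).foldl
      (fun divs i =>
        if PySem.Int.mod n i = 0 then
          let divs := divs ++ [i]
          let j := PySem.Int.floordiv n i
          if j ≠ i then divs ++ [j] else divs
        else divs) []) (fun x => x) false = _
  rw [hbody, PySem.List.foldl_append_eq_flatMap]
  simp

-- removing one occurrence of 1 (try/except style), when 1 occurs at most once,
-- turns the scan into a scan that skips 1
theorem any_removeOne (Q : Int → Bool) :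
    ∀ (l : List Int), l.count 1 ≤ 1 →
      ((PySem.List.remove? l 1).getD l).any Q = l.any (fun d => (d != 1) && Q d) := by
  intro l
  induction l with
  | nil => intro _; rfl
  | cons x t ih =>
    intro hc
    by_cases hx : x = 1
    · subst hx
      rw [PySem.List.remove?_cons_self]
      have h0 : t.count 1 = 0 := by
        simp at hc; omega
      have h1 : (1 : Int) ∉ t := by
        rwa [← List.count_eq_zero]
      simp only [Option.getD_some, List.any_cons]
      have : t.any (fun d => (d != 1) && Q d) = t.any Q := by
        apply PySem.List.any_congr_mem
        intro d hd
        have : d ≠ 1 := fun h => h1 (h ▸ hd)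
        simp [this]
      simp [this]
    · rw [PySem.List.remove?_cons_of_ne t hx]
      have hct : t.count 1 ≤ 1 := by
        simp [List.count_cons] at hc ⊢
        omega
      cases hr : PySem.List.remove? t 1 with
      | none =>
        have := ih hct
        rw [hr] at this
        have hxb : (x != 1) = true := by simpa using hx
        simp only [Option.map_none, Option.getD_none, List.any_cons] at this ⊢
        simp [this, hxb]
      | some t' =>
        have := ih hct
        rw [hr] at this
        have hxb : (x != 1) = true := by simpa using hx
        simp only [Option.map_some, Option.getD_some, List.any_cons] at this ⊢
        simp [this, hxb]

-- any over a permutation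
theorem perm_any {l₁ l₂ : List Int} (h : l₁.Perm l₂) (f : Int → Bool) :
    l₁.any f = l₂.any f := by
  induction h with
  | nil => rfl
  | cons x _ ih => simp [ih]
  | swap x y l => simp [List.any_cons]; rw [← Bool.or_assoc, ← Bool.or_assoc, Bool.or_comm (f y) (f x)]
  | trans _ _ ih1 ih2 => rw [ih1, ih2]

-- i ≤ isqrt n (as Int) gives i * i ≤ n
theorem sq_le_of_le_sqrt (n i : Int) (hn : 1 ≤ n) (h1 : 1 ≤ i)
    (h2 : i < (Nat.sqrt n.toNat : Int) + 1) : i * i ≤ n := by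
  have hi : i.toNat ≤ Nat.sqrt n.toNat := by omega
  have h0 := Nat.le_sqrt.mp hi
  have h' : ((i.toNat * i.toNat : Nat) : Int) ≤ ((n.toNat : Nat) : Int) := by exact_mod_cast h0
  have e1 : ((i.toNat : Nat) : Int) = i := by omega
  have e2 : ((n.toNat : Nat) : Int) = n := by omega
  push_cast at h'
  rw [e1, e2] at h'
  exact h'

-- 1 appears at most once among the elements A collects
theorem count_one_flatMap (n : Int) (hn : 1 ≤ n) :
    ((PySem.List.pyRange 1 ((Nat.sqrt n.toNat : Int) + 1) 1).flatMap (divChunk n)).count 1 ≤ 1 := by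
  set r : Int := (Nat.sqrt n.toNat : Int) with hr
  have hr1 : 1 ≤ r := by
    rw [hr]
    have : 1 ≤ Nat.sqrt n.toNat := by
      have : 1 ≤ n.toNat := by omega
      calc 1 = Nat.sqrt 1 := by decide
        _ ≤ Nat.sqrt n.toNat := Nat.sqrt_le_sqrt this
    exact_mod_cast this
  rw [PySem.List.pyRange_one_cons (by omega)]
  rw [List.flatMap_cons, List.count_append]
  have hsq : ∀ i : Int, 2 ≤ i → i < r + 1 → (1 : Int) ∉ divChunk n i := by
    intro i h2 hlt hmem
    have hii : i * i ≤ n := sq_le_of_le_sqrt n i hn (by omega) hlt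
    simp only [divChunk] at hmem
    split_ifs at hmem with h1 hji
    · simp only [List.mem_cons, List.not_mem_nil, or_false] at hmem
      rcases hmem with h | h
      · omega
      · have hpos : (0 : Int) < i := by omega
        have := (PySem.Int.floordiv_eq_iff_of_pos (a := n) (b := i) (q := 1) hpos).mp h.symm
        nlinarith
    · simp only [List.mem_cons, List.not_mem_nil, or_false] at hmem
      omega
    · simp at hmem
  have hrest : ((PySem.List.pyRange (1 + 1) (r + 1) 1).flatMap (divChunk n)).count 1 = 0 := by
    rw [List.count_eq_zero]
    intro hmem
    rcases List.mem_flatMap.mp hmem with ⟨i, hi, h1⟩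
    rcases (PySem.List.mem_pyRange_one).mp hi with ⟨h2, h3⟩
    exact hsq i (by omega) h3 h1
  have hhead : (divChunk n 1).count 1 ≤ 1 := by
    simp only [divChunk]
    have hm1 : PySem.Int.mod n 1 = 0 := by
      rw [PySem.Int.mod_eq_zero_iff_dvd]; exact one_dvd n
    have hf1 : PySem.Int.floordiv n 1 = n := by
      rw [PySem.Int.floordiv_eq_ediv_of_pos (by norm_num)]; simp
    rw [if_pos hm1]
    split_ifs with h
    · rw [hf1] at h ⊢
      simp [h]
    · simp
  omega

-- A's collected elements are exactly the positive divisors of n (n ≥ 1)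
theorem mem_flatMap_iff (n : Int) (hn : 1 ≤ n) (d : Int) :
    d ∈ (PySem.List.pyRange 1 ((Nat.sqrt n.toNat : Int) + 1) 1).flatMap (divChunk n) ↔
      (1 ≤ d ∧ d ∣ n) := by
  set r : Int := (Nat.sqrt n.toNat : Int) with hr
  constructor
  · intro hmem
    rcases List.mem_flatMap.mp hmem with ⟨i, hi, hd⟩
    rcases (PySem.List.mem_pyRange_one).mp hi with ⟨h1, h2⟩
    have hii : i * i ≤ n := sq_le_of_le_sqrt n i hn h1 h2
    have hpos : (0 : Int) < i := by omega
    simp only [divChunk] at hd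
    split_ifs at hd with hm hj
    · have hdvd : i ∣ n := (PySem.Int.mod_eq_zero_iff_dvd n i).mp hm
      simp only [List.mem_cons, List.not_mem_nil, or_false] at hd
      rcases hd with h | h
      · exact ⟨by omega, h ▸ hdvd⟩
      · subst h
        rw [PySem.Int.floordiv_eq_ediv_of_pos hpos]
        refine ⟨?_, Int.ediv_dvd_of_dvd hdvd⟩
        exact (Int.le_ediv_iff_mul_le hpos).mpr (by nlinarith : 1 * i ≤ n)
    · have hdvd : i ∣ n := (PySem.Int.mod_eq_zero_iff_dvd n i).mp hm
      simp only [List.mem_cons, List.not_mem_nil, or_false] at hd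
      subst hd; exact ⟨by omega, hdvd⟩
    · simp at hd
  · rintro ⟨h1, hdvd⟩
    have hdn : d ≤ n := Int.le_of_dvd (by omega) hdvd
    have hrpos : 1 ≤ r := by
      rw [hr]
      have : 1 ≤ Nat.sqrt n.toNat := by
        have : 1 ≤ n.toNat := by omega
        calc 1 = Nat.sqrt 1 := by decide
          _ ≤ Nat.sqrt n.toNat := Nat.sqrt_le_sqrt this
      exact_mod_cast this
    by_cases hsmall : d ≤ r
    · -- d itself is enumerated
      apply List.mem_flatMap.mpr
      refine ⟨d, (PySem.List.mem_pyRange_one).mpr ⟨h1, by omega⟩, ?_⟩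
      have hm : PySem.Int.mod n d = 0 := (PySem.Int.mod_eq_zero_iff_dvd n d).mpr hdvd
      simp only [divChunk, if_pos hm]
      simp
    · -- d = n // c for the cofactor c = n / d, which is ≤ r
      rcases hdvd with ⟨c, hc⟩
      have hdpos : (0 : Int) < d := by omega
      have hcpos : (0 : Int) < c := by nlinarith
      have hcr : c ≤ r := by
        -- c * (r+1) ≤ c * d = n < (r+1)^2, and r+1 > 0
        by_contra hcon
        push_neg at hcon
        have hlt : n < (r + 1) * (r + 1) := by
          rw [hr]
          have h0 : n.toNat < (Nat.sqrt n.toNat + 1) * (Nat.sqrt n.toNat + 1) :=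
            Nat.lt_succ_sqrt n.toNat
          have h' : ((n.toNat : Nat) : Int) < (((Nat.sqrt n.toNat + 1) * (Nat.sqrt n.toNat + 1) : Nat) : Int) := by
            exact_mod_cast h0
          have e2 : ((n.toNat : Nat) : Int) = n := by omega
          push_cast at h'
          rw [e2] at h'
          exact h'
        nlinarith
      have hcdvd : c ∣ n := ⟨d, by rw [hc]; ring⟩
      apply List.mem_flatMap.mpr
      refine ⟨c, (PySem.List.mem_pyRange_one).mpr ⟨by omega, by omega⟩, ?_⟩
      have hm : PySem.Int.mod n c = 0 := (PySem.Int.mod_eq_zero_iff_dvd n c).mpr hcdvd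
      have hfd : PySem.Int.floordiv n c = d := by
        rw [PySem.Int.floordiv_eq_ediv_of_pos hcpos, hc, Int.mul_ediv_cancel _ (by omega : c ≠ 0)]
      simp only [divChunk, if_pos hm, hfd]
      by_cases hdc : d = c
      · simp [hdc]
      · simp [hdc]
  
-- B's first loop returns false exactly when the progression from d hits a divisor of n in [d, r]
theorem pkLoop1_eq_false_iff (p n r : Int) (hp : 0 < p) :
    ∀ (d : Int), pkLoop1 p n r d = false ↔
      ∃ m : Int, d ≤ m ∧ m ≤ r ∧ p ∣ (m - d) ∧ m ∣ n := by
  intro d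
  induction hk : (r + 1 - d).toNat using Nat.strong_induction_on generalizing d with
  | _ k ih =>
  rw [pkLoop1]
  by_cases hle : d ≤ r
  · rw [dif_pos ⟨hle, hp⟩]
    by_cases hm : PySem.Int.mod n d = 0
    · rw [if_pos hm]
      have hdvd : d ∣ n := (PySem.Int.mod_eq_zero_iff_dvd n d).mp hm
      simp only [true_iff]
      exact ⟨d, le_refl d, hle, by simp, hdvd⟩
    · rw [if_neg hm]
      have hrec := ih (r + 1 - (d + p)).toNat (by omega) (d + p) rfl
      rw [hrec]
      constructor
      · rintro ⟨m, h1, h2, h3, h4⟩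
        exact ⟨m, by omega, h2, by
          rcases h3 with ⟨k, hk3⟩
          exact ⟨k + 1, by linarith⟩, h4⟩
      · rintro ⟨m, h1, h2, h3, h4⟩
        have hmd : d < m := by
          rcases lt_or_eq_of_le h1 with h | h
          · exact h
          · exact absurd ((PySem.Int.mod_eq_zero_iff_dvd n d).mpr (h ▸ h4)) hm
        rcases h3 with ⟨k, hk3⟩
        have hkpos : 1 ≤ k := by
          by_contra hcon
          have : p * k ≤ 0 := mul_nonpos_of_nonneg_of_nonpos (le_of_lt hp) (by omega)
          omega
        have hpk : p * 1 ≤ p * k := mul_le_mul_of_nonneg_left hkpos (le_of_lt hp)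
        refine ⟨m, by linarith, h2, ⟨k - 1, by rw [mul_sub, mul_one]; linarith⟩, h4⟩
  · rw [dif_neg (fun hcon => hle hcon.1)]
    simp only [Bool.true_eq_false, false_iff]
    rintro ⟨m, h1, h2, -, -⟩
    omega

-- B's second loop returns false exactly when the progression from c hits a cofactor in [c, r]
-- whose complementary divisor n // m is > 1 and ≡ 1 (mod p)
theorem pkLoop2_eq_false_iff (p n r : Int) (hp : 0 < p) :
    ∀ (c : Int), pkLoop2 p n r c = false ↔
      ∃ m : Int, c ≤ m ∧ m ≤ r ∧ p ∣ (m - c) ∧ m ∣ n ∧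
        1 < PySem.Int.floordiv n m ∧ PySem.Int.mod (PySem.Int.floordiv n m) p = 1 := by
  intro c
  induction hk : (r + 1 - c).toNat using Nat.strong_induction_on generalizing c with
  | _ k ih =>
  rw [pkLoop2]
  by_cases hle : c ≤ r
  · rw [dif_pos ⟨hle, hp⟩]
    have hrec := ih (r + 1 - (c + p)).toNat (by omega) (c + p) rfl
    have hshift : (∃ m : Int, c + p ≤ m ∧ m ≤ r ∧ p ∣ (m - (c + p)) ∧ m ∣ n ∧
          1 < PySem.Int.floordiv n m ∧ PySem.Int.mod (PySem.Int.floordiv n m) p = 1) ↔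
        (∃ m : Int, c ≤ m ∧ m ≤ r ∧ m ≠ c ∧ p ∣ (m - c) ∧ m ∣ n ∧
          1 < PySem.Int.floordiv n m ∧ PySem.Int.mod (PySem.Int.floordiv n m) p = 1) := by
      constructor
      · rintro ⟨m, h1, h2, h3, h4, h5, h6⟩
        refine ⟨m, by omega, h2, by omega, ?_, h4, h5, h6⟩
        rcases h3 with ⟨k, hk3⟩
        exact ⟨k + 1, by linarith⟩
      · rintro ⟨m, h1, h2, hne, h3, h4, h5, h6⟩
        rcases h3 with ⟨k, hk3⟩
        have hmd : c < m := by
          rcases lt_or_eq_of_le h1 with h | h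
          · exact h
          · exact absurd h.symm hne
        have hkpos : 1 ≤ k := by
          by_contra hcon
          have : p * k ≤ 0 := mul_nonpos_of_nonneg_of_nonpos (le_of_lt hp) (by omega)
          omega
        have hpk : p * 1 ≤ p * k := mul_le_mul_of_nonneg_left hkpos (le_of_lt hp)
        refine ⟨m, by linarith, h2, ⟨k - 1, by rw [mul_sub, mul_one]; linarith⟩, h4, h5, h6⟩
    by_cases hm : PySem.Int.mod n c = 0
    · rw [if_pos hm]
      have hdvd : c ∣ n := (PySem.Int.mod_eq_zero_iff_dvd n c).mp hm
      by_cases hinner : (decide (PySem.Int.floordiv n c > 1) && (PySem.Int.mod (PySem.Int.floordiv n c) p == 1)) = true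
      · rw [if_pos hinner]
        simp only [true_iff]
        rcases (by simpa using hinner :
          1 < PySem.Int.floordiv n c ∧ PySem.Int.mod (PySem.Int.floordiv n c) p = 1) with ⟨hi1, hi2⟩
        exact ⟨c, le_refl c, hle, by simp, hdvd, hi1, hi2⟩
      · rw [if_neg hinner, hrec, hshift]
        constructor
        · rintro ⟨m, h1, h2, hne, h3, h4, h5, h6⟩
          exact ⟨m, h1, h2, h3, h4, h5, h6⟩
        · rintro ⟨m, h1, h2, h3, h4, h5, h6⟩
          refine ⟨m, h1, h2, ?_, h3, h4, h5, h6⟩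
          intro heq
          subst heq
          exact hinner (by simp [h5, h6])
    · rw [if_neg hm, hrec, hshift]
      constructor
      · rintro ⟨m, h1, h2, hne, h3, h4, h5, h6⟩
        exact ⟨m, h1, h2, h3, h4, h5, h6⟩
      · rintro ⟨m, h1, h2, h3, h4, h5, h6⟩
        refine ⟨m, h1, h2, ?_, h3, h4, h5, h6⟩
        intro heq
        subst heq
        exact hm ((PySem.Int.mod_eq_zero_iff_dvd n m).mpr h4)
  · rw [dif_neg (fun hcon => hle hcon.1)]
    simp only [Bool.true_eq_false, false_iff]
    rintro ⟨m, h1, h2, -, -⟩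
    omega

-- modular bridge: for 0 < p, d % p = 1 ↔ p ∣ d - 1
theorem mod_eq_one_iff (p d : Int) (hp : 1 < p) :
    PySem.Int.mod d p = 1 ↔ p ∣ (d - 1) := by
  rw [PySem.Int.mod_eq_emod_of_pos (by omega)]
  constructor
  · intro h
    refine ⟨d / p, ?_⟩
    have := Int.ediv_add_emod d p
    omega
  · rintro ⟨k, hk⟩
    have hd : d = 1 + p * k := by omega
    rw [hd, Int.add_mul_emod_self_left]
    exact Int.emod_eq_of_lt (by omega) (by omega)

-- ===== VERDICT (by name: the statement is the Claim_ definition above) =====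
theorem p_killable_spec : Claim_equal_p_killable := by
  unfold Claim_equal_p_killable
  intro p n _ hpre
  unfold Spec_p_killable
  by_cases hn : n ≤ 0
  · -- no divisors at all: both sides are True
    have hA : p_killable p n = true := by
      show (!(((PySem.List.remove? (divisorsA n) 1).getD (divisorsA n)).any
        (fun d => PySem.Int.mod d p == 1))) = true
      have h1 : divisorsA n = [] := by unfold divisorsA; rw [if_pos hn]
      rw [h1]
      simp [PySem.List.remove?]
    rw [hA]
    unfold p_killable_alt
    rw [if_pos (Or.inr hn)]
  · have hn1 : 1 ≤ n := by omega
    by_cases hp : p ≤ 1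
    · -- p ≤ 1: 'd % p == 1' can never hold, both sides True
      have hB : p_killable_alt p n = true := by
        unfold p_killable_alt; rw [if_pos (Or.inl hp)]
      rw [hB]
      by_cases hp0 : p = 0
      · -- Pre_ leaves only n = 1 here
        have hn1' : n = 1 := by
          unfold Pre_p_killable at hpre
          omega
        subst hn1'
        have hd1 : divisorsA 1 = [1] := by decide
        show (!(((PySem.List.remove? (divisorsA 1) 1).getD (divisorsA 1)).any
          (fun d => PySem.Int.mod d p == 1))) = true
        rw [hd1, PySem.List.remove?_cons_self]
        simp
      · -- p = 1 or p < 0: the remainder is never 1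
        have hQ : ∀ d : Int, (PySem.Int.mod d p == 1) = false := by
          intro d
          rcases lt_or_eq_of_le hp with h | h
          · by_cases hneg : p < 0
            · have := PySem.Int.mod_neg_bounds (a := d) hneg
              simp
              omega
            · have hp1 : p = 0 := by omega
              exact absurd hp1 hp0
          · subst h
            rw [PySem.Int.mod_eq_emod_of_pos (by norm_num)]
            simp
        show (!(((PySem.List.remove? (divisorsA n) 1).getD (divisorsA n)).any
          (fun d => PySem.Int.mod d p == 1))) = true
        have : (((PySem.List.remove? (divisorsA n) 1).getD (divisorsA n)).any
          (fun d => PySem.Int.mod d p == 1)) = false := by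
          apply List.any_eq_false.mpr
          intro d _
          simp only [hQ d]
          simp
        rw [this]
        rfl
    · -- the real case: p ≥ 2 and n ≥ 1
      have hp2 : 2 ≤ p := by omega
      have hppos : (0 : Int) < p := by omega
      set r : Int := (Nat.sqrt n.toNat : Int) with hr
      set L : List Int := (PySem.List.pyRange 1 (r + 1) 1).flatMap (divChunk n) with hL
      have hdiv : divisorsA n = PySem.List.sorted L (fun x => x) false :=
        divisorsA_eq_flatMap n (by omega)
      have hperm : (PySem.List.sorted L (fun x => x) false).Perm L :=
        PySem.List.sorted_perm L (fun x => x) false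
      have hcount : (PySem.List.sorted L (fun x => x) false).count 1 ≤ 1 := by
        rw [hperm.count_eq]
        exact count_one_flatMap n hn1
      have hA : p_killable p n =
          !(L.any (fun d => (d != 1) && (PySem.Int.mod d p == 1))) := by
        show (!(((PySem.List.remove? (divisorsA n) 1).getD (divisorsA n)).any
          (fun d => PySem.Int.mod d p == 1))) = _
        rw [hdiv, any_removeOne _ _ hcount, perm_any hperm]
      set c0 : Int := if PySem.Int.mod n p = 0 then p else PySem.Int.mod n p with hc0
      have hc0b : 1 ≤ c0 ∧ c0 ≤ p := by
        rw [hc0]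
        split_ifs with h
        · exact ⟨by omega, le_refl p⟩
        · have h1 := PySem.Int.mod_nonneg (a := n) hppos
          have h2 := PySem.Int.mod_lt (a := n) hppos
          constructor <;> omega
      have hc0n : p ∣ (n - c0) := by
        rw [hc0]
        split_ifs with h
        · have hdn : p ∣ n := (PySem.Int.mod_eq_zero_iff_dvd n p).mp h
          exact dvd_sub hdn (dvd_refl p)
        · have := PySem.Int.floordiv_mul_add_mod n p
          exact ⟨PySem.Int.floordiv n p, by linarith⟩
      have hB : p_killable_alt p n =
          (if pkLoop1 p n r (1 + p) then pkLoop2 p n r c0 else false) := by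
        rw [hr, hc0]
        show p_killable_alt p n = _
        unfold p_killable_alt
        rw [if_neg (by omega : ¬(p ≤ 1 ∨ n ≤ 0))]
      -- the list scan finds a hit exactly when one of the two progression walks does
      have key : (L.any (fun d => (d != 1) && (PySem.Int.mod d p == 1)) = true) ↔
          (pkLoop1 p n r (1 + p) = false ∨ pkLoop2 p n r c0 = false) := by
        rw [pkLoop1_eq_false_iff p n r hppos, pkLoop2_eq_false_iff p n r hppos,
          List.any_eq_true]
        constructor
        · rintro ⟨d, hmem, hQ⟩
          rcases (mem_flatMap_iff n hn1 d).mp hmem with ⟨hd1, hdvd⟩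
          have hQ' : d ≠ 1 ∧ PySem.Int.mod d p = 1 := by simpa using hQ
          have hdv1 : p ∣ (d - 1) := (mod_eq_one_iff p d (by omega)).mp hQ'.2
          have hd2 : 2 ≤ d := by omega
          have hdp : 1 + p ≤ d := by
            have : p ≤ d - 1 := Int.le_of_dvd (by omega : 0 < d - 1) hdv1
            omega
          by_cases hdr : d ≤ r
          · left
            refine ⟨d, hdp, hdr, ?_, hdvd⟩
            have : d - (1 + p) = (d - 1) - p := by ring
            rw [this]
            exact dvd_sub hdv1 (dvd_refl p)
          · right
            rcases hdvd with ⟨c, hc⟩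
            have hdpos : (0 : Int) < d := by omega
            have hcpos : (0 : Int) < c := by nlinarith
            have hcr : c ≤ r := by
              by_contra hcon
              push_neg at hcon
              have hlt : n < (r + 1) * (r + 1) := by
                rw [hr]
                have h0 : n.toNat < (Nat.sqrt n.toNat + 1) * (Nat.sqrt n.toNat + 1) :=
                  Nat.lt_succ_sqrt n.toNat
                have h' : ((n.toNat : Nat) : Int) <
                    (((Nat.sqrt n.toNat + 1) * (Nat.sqrt n.toNat + 1) : Nat) : Int) := by
                  exact_mod_cast h0
                have e2 : ((n.toNat : Nat) : Int) = n := by omega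
                push_cast at h'
                rw [e2] at h'
                exact h'
              push_neg at hdr
              nlinarith
            have hcdvd : c ∣ n := ⟨d, by rw [hc]; ring⟩
            have hfd : PySem.Int.floordiv n c = d := by
              rw [PySem.Int.floordiv_eq_ediv_of_pos hcpos, hc,
                Int.mul_ediv_cancel _ (by omega : c ≠ 0)]
            have hnc : p ∣ (n - c) := by
              rcases hdv1 with ⟨k, hk⟩
              exact ⟨c * k, by rw [hc]; nlinarith [hk]⟩
            have hcc0 : p ∣ (c - c0) := by
              have : c - c0 = (n - c0) - (n - c) := by ring
              rw [this]
              exact dvd_sub hc0n hnc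
            have hc0c : c0 ≤ c := by
              by_contra hcon
              rcases hcc0 with ⟨k, hk⟩
              by_cases hk0 : 0 ≤ k
              · have : 0 ≤ p * k := mul_nonneg (by omega) hk0
                omega
              · have hk1 : k ≤ -1 := by omega
                have : p * k ≤ p * (-1) := mul_le_mul_of_nonneg_left hk1 (by omega)
                omega
            refine ⟨c, hc0c, hcr, hcc0, hcdvd, ?_, ?_⟩
            · rw [hfd]; omega
            · rw [hfd]; exact hQ'.2
        · rintro (⟨m, h1, h2, h3, h4⟩ | ⟨m, h1, h2, h3, h4, h5, h6⟩)
          · -- first walk hit: m itself is the divisor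
            have hdv1 : p ∣ (m - 1) := by
              have : m - 1 = (m - (1 + p)) + p := by ring
              rw [this]
              exact dvd_add h3 (dvd_refl p)
            have hm1 : PySem.Int.mod m p = 1 := (mod_eq_one_iff p m (by omega)).mpr hdv1
            refine ⟨m, (mem_flatMap_iff n hn1 m).mpr ⟨by omega, h4⟩, ?_⟩
            have : m ≠ 1 := by omega
            simp [hm1, this]
          · -- second walk hit: the divisor is n // m
            have hmpos : (0 : Int) < m := by omega
            have hfd : PySem.Int.floordiv n m = n / m :=
              PySem.Int.floordiv_eq_ediv_of_pos hmpos
            have hddvd : (n / m) ∣ n := Int.ediv_dvd_of_dvd h4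
            refine ⟨PySem.Int.floordiv n m,
              (mem_flatMap_iff n hn1 (PySem.Int.floordiv n m)).mpr
                ⟨by omega, by rw [hfd]; exact hddvd⟩, ?_⟩
            have : PySem.Int.floordiv n m ≠ 1 := by omega
            simp [h6, this]
      rw [hA, hB]
      cases h1 : pkLoop1 p n r (1 + p) with
      | false =>
        rw [key.mpr (Or.inl h1)]
        simp
      | true =>
        cases h2 : pkLoop2 p n r c0 with
        | false =>
          rw [key.mpr (Or.inr h2)]
          simp [h2]
        | true =>
          have hAv : L.any (fun d => (d != 1) && (PySem.Int.mod d p == 1)) = false := by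
            cases hv : L.any (fun d => (d != 1) && (PySem.Int.mod d p == 1)) with
            | false => rfl
            | true =>
              rcases key.mp hv with h | h
              · rw [h1] at h; cases h
              · rw [h2] at h; cases h
          rw [hAv]
          simp [h2]
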